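-- pv_equiv track=rewrite | github.com/victoralonsorodriguez/CMOD | py_scripts_external/py_plot_galfit_all.py | grid_pos
-- ===== SOURCE A (Python) =====
-- def grid_pos(row,col):
--
--     positions = []
--
--     # obtaining the grid positions
--     for i in range(col):
--         for j in range(row):
--             positions.append((j,i))
--
--     # if there are only 2 rows do nothing
--     if row<2 or row == 2:
--
--         return positions
--
--     # if there are more that 2 rows we want at first to
--     # put the plots in the row 1 and 3 and then move
--     # to another column. Then put the plots in the 2 and 4 rows
--     else:
--         even_pos = []
--         odd_pos = []
--
--         # the 1 and 3 rows correspond to the even positions tuples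
--         # from the grid positions list
--         for i  in range(len(positions)):
--             if i%2 == 0:
--                 even_pos.append(positions[i])
--
--             else:
--                 odd_pos.append(positions[i])
--
--         pos_sort = even_pos+odd_pos
--
--         return pos_sort
-- ===== SOURCE B (Python) =====
-- def grid_pos(row, col):
--     # compute each coordinate from its column-major linear index:
--     # index k corresponds to (k % row, k // row); for row > 2 emit the
--     # even-indexed positions first via strided ranges, no intermediate list.
--     if row <= 0 or col <= 0:
--         return []
--     n = row * col
--     if row <= 2:
--         return [(k % row, k // row) for k in range(n)]
--     return [(k % row, k // row) for k in range(0, n, 2)] + \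
--            [(k % row, k // row) for k in range(1, n, 2)]
-- ===== Notes on version B (the rewrite author's own statement) =====
-- stated objective: alternative
-- what changed: B computes each coordinate directly from its column-major linear index k as (k % row, k // row), emitting the even/odd interleave via strided ranges, instead of building the full positions list with nested loops and then re-scanning it by index parity into two accumulator lists.
import Mathlib
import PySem

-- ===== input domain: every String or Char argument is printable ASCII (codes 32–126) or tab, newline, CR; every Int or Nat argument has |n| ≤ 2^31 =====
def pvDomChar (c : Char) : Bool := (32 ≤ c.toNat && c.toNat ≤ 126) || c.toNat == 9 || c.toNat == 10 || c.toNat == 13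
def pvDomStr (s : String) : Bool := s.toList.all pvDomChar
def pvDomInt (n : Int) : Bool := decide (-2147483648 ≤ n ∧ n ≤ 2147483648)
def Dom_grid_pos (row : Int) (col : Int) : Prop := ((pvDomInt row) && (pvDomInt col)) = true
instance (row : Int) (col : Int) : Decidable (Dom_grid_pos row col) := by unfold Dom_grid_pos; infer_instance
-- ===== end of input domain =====

-- B computes each coordinate directly from its column-major linear index
-- (k % row, k // row) via strided ranges, instead of building the positions
-- list with nested loops and re-scanning it by index parity (objective:
-- alternative decomposition; same asymptotic cost).

-- ===== PORT A =====
def grid_pos (row : Int) (col : Int) : List (Int × Int) :=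
  -- positions built by the nested for-loops with append
  let positions : List (Int × Int) :=
    (PySem.List.pyRange 0 col 1).foldl (fun acc i =>
      (PySem.List.pyRange 0 row 1).foldl (fun acc2 j => acc2 ++ [(j, i)]) acc) []
  if row < 2 ∨ row = 2 then
    positions
  else
    -- the parity-splitting index loop over range(len(positions));
    -- positions[i] is pyGetD with an arbitrary default: i is always in range here
    let p :=
      (PySem.List.pyRange 0 (positions.length : Int) 1).foldl
        (fun (p : List (Int × Int) × List (Int × Int)) i =>
          if PySem.Int.mod i 2 = 0 then (p.1 ++ [PySem.List.pyGetD positions i (0, 0)], p.2)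
          else (p.1, p.2 ++ [PySem.List.pyGetD positions i (0, 0)]))
        ([], [])
    p.1 ++ p.2

-- ===== PORT B =====
def grid_pos_alt (row : Int) (col : Int) : List (Int × Int) :=
  if row ≤ 0 ∨ col ≤ 0 then []
  else
    let n := row * col
    let f : Int → Int × Int := fun k => (PySem.Int.mod k row, PySem.Int.floordiv k row)
    if row ≤ 2 then (PySem.List.pyRange 0 n 1).map f
    else (PySem.List.pyRange 0 n 2).map f ++ (PySem.List.pyRange 1 n 2).map f

-- ===== PRECONDITION & SPEC =====
def Spec_grid_pos (row : Int) (col : Int) (out : List (Int × Int)) : Prop := out = grid_pos_alt row col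
instance (row : Int) (col : Int) (out : List (Int × Int)) : Decidable (Spec_grid_pos row col out) := by unfold Spec_grid_pos; infer_instance

-- ===== CLAIM (what is proved, stated in full; the proofs are below) =====
def Claim_equal_grid_pos : Prop := ∀ (row : Int) (col : Int), Dom_grid_pos row col → Spec_grid_pos row col (grid_pos row col)

-- ===== LEMMAS AND PROOFS =====

-- the nested-loop positions list is the column-major index map k ↦ (k % row, k // row)
theorem pos_eq_map (row : Int) (hr : 0 < row) (c : Nat) :
    (PySem.List.pyRange 0 (c : Int) 1).flatMap
        (fun i => (PySem.List.pyRange 0 row 1).map (fun j => (j, i)))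
      = (PySem.List.pyRange 0 (row * c) 1).map
          (fun k => (PySem.Int.mod k row, PySem.Int.floordiv k row)) := by
  induction c with
  | zero => simp [PySem.List.pyRange_one_eq_nil]
  | succ c ih =>
    have h1 : ((c + 1 : Nat) : Int) = (c : Int) + 1 := by push_cast; ring
    rw [h1, PySem.List.pyRange_one_succ_right (by positivity), List.flatMap_append, ih]
    have h2 : row * ((c : Int) + 1) = row * c + row := by ring
    rw [h2, PySem.List.pyRange_one_append 0 (row * c) (row * c + row) (by positivity) (by omega),
        List.map_append]
    congr 1
    simp only [List.flatMap_cons, List.flatMap_nil, List.append_nil]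
    rw [PySem.List.pyRange_one, PySem.List.pyRange_one]
    simp only [List.map_map]
    have hlen : (row * c + row - (row * c)).toNat = (row - 0).toNat := by omega
    rw [hlen]
    apply List.map_congr_left
    intro k hk
    simp only [List.mem_range] at hk
    have hk' : (k : Int) < row := by omega
    have hk0 : (0 : Int) ≤ k := by positivity
    simp only [Function.comp]
    rw [PySem.Int.mod_eq_emod_of_pos hr, PySem.Int.floordiv_eq_ediv_of_pos hr]
    refine Prod.ext ?_ ?_ <;> simp only
    · rw [show row * (c : Int) + (k : Int) = (k : Int) + row * c by ring,
          Int.add_mul_emod_self_left, Int.emod_eq_of_lt hk0 hk']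
      ring
    · rw [show row * (c : Int) + (k : Int) = (k : Int) + row * c by ring,
          Int.add_mul_ediv_left _ _ (by omega : row ≠ 0),
          Int.ediv_eq_zero_of_lt hk0 hk']
      ring

-- A's parity-splitting loop over indices 0..n-1 yields the two strided index maps
theorem parity_split {α : Type} (f : Int → α) (n : Nat) (e o : List α) :
    ((List.range n).map (fun k : Nat => ((k : Int)))).foldl
        (fun (p : List α × List α) i =>
          if PySem.Int.mod i 2 = 0 then (p.1 ++ [f i], p.2) else (p.1, p.2 ++ [f i]))
        (e, o)
      = (e ++ (List.range ((n + 1) / 2)).map (fun k : Nat => f (2 * (k : Int))),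
         o ++ (List.range (n / 2)).map (fun k : Nat => f (1 + 2 * (k : Int)))) := by
  induction n generalizing e o with
  | zero => simp
  | succ n ih =>
    rw [List.range_succ, List.map_append, List.foldl_append, ih]
    simp only [List.map_cons, List.map_nil, List.foldl_cons, List.foldl_nil]
    rw [PySem.Int.mod_eq_emod_of_pos (by norm_num)]
    rcases Nat.even_or_odd n with he | ho
    · obtain ⟨m, hm⟩ := he
      have hmod : ((n : Int)) % 2 = 0 := by omega
      have h1 : (n + 1 + 1) / 2 = (n + 1) / 2 + 1 := by omega
      have h2 : (n + 1) / 2 = n / 2 := by omega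
      rw [if_pos hmod, h1, h2, List.range_succ]
      simp [List.map_append, List.append_assoc]
      congr 1
      omega
    · obtain ⟨m, hm⟩ := ho
      have hmod : ¬ ((n : Int)) % 2 = 0 := by omega
      have h1 : (n + 1 + 1) / 2 = (n + 1) / 2 := by omega
      have h2 : (n + 1) / 2 = n / 2 + 1 := by omega
      rw [if_neg hmod, h1, h2, List.range_succ]
      simp [List.map_append, List.append_assoc]
      congr 1
      omega

theorem grid_pos_main (row col : Int) : grid_pos row col = grid_pos_alt row col := by
  by_cases hc : col ≤ 0
  · have hcol : PySem.List.pyRange 0 col 1 = [] := PySem.List.pyRange_one_eq_nil (by omega)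
    simp [grid_pos, grid_pos_alt, hcol, hc, PySem.List.pyRange_one_eq_nil]
  · by_cases hr0 : row ≤ 0
    · have hrow : PySem.List.pyRange 0 row 1 = [] := PySem.List.pyRange_one_eq_nil (by omega)
      simp [grid_pos, grid_pos_alt, hrow, hr0, PySem.List.pyRange_one_eq_nil]
    · -- row > 0 and col > 0
      have hc' : 0 < col := by omega
      have hr0' : 0 < row := by omega
      have hpos :
          (PySem.List.pyRange 0 col 1).foldl (fun acc i =>
            (PySem.List.pyRange 0 row 1).foldl (fun acc2 j => acc2 ++ [(j, i)]) acc) []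
          = (PySem.List.pyRange 0 (row * col) 1).map
              (fun k => (PySem.Int.mod k row, PySem.Int.floordiv k row)) := by
        have hcc : ((col.toNat : Nat) : Int) = col := by omega
        calc _ = (PySem.List.pyRange 0 col 1).foldl (fun acc i =>
                  acc ++ (PySem.List.pyRange 0 row 1).map (fun j => (j, i))) [] := by
                  congr 1
                  funext acc i
                  exact PySem.List.foldl_append_singleton_eq_map _ _ _
          _ = (PySem.List.pyRange 0 col 1).flatMap
                (fun i => (PySem.List.pyRange 0 row 1).map (fun j => (j, i))) := by
                  rw [PySem.List.foldl_append_eq_flatMap]; simp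
          _ = _ := by rw [← hcc]; exact pos_eq_map row hr0' col.toNat
      simp only [grid_pos, grid_pos_alt, hpos]
      rw [if_neg (by omega : ¬ (row ≤ 0 ∨ col ≤ 0))]
      by_cases hr2 : row ≤ 2
      · rw [if_pos (by omega : row < 2 ∨ row = 2), if_pos hr2]
      · rw [if_neg (by omega : ¬ (row < 2 ∨ row = 2)), if_neg hr2]
        have hn1 : (1 : Int) < row * col := by nlinarith
        have hN : ((PySem.List.pyRange 0 (row * col) 1).map
            (fun k => (PySem.Int.mod k row, PySem.Int.floordiv k row))).length
            = (row * col).toNat := by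
          simp [PySem.List.length_pyRange_one]
        rw [hN]
        have hr1 : PySem.List.pyRange 0 (((row * col).toNat : Nat) : Int) 1
            = (List.range (row * col).toNat).map (fun k : Nat => ((k : Int))) := by
          rw [PySem.List.pyRange_one]; simp; congr 2; omega
        rw [hr1, parity_split]
        rw [PySem.List.pyRange_of_pos 0 (row * col) (by norm_num : (0:Int) < 2),
            PySem.List.pyRange_of_pos 1 (row * col) (by norm_num : (0:Int) < 2)]
        rw [if_pos (by omega : (0:Int) < row * col), if_pos hn1]
        have hce : ((row * col - 0 + 2 - 1) / 2).toNat = ((row * col).toNat + 1) / 2 := by omega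
        have hco : ((row * col - 1 + 2 - 1) / 2).toNat = (row * col).toNat / 2 := by omega
        rw [hce, hco]
        simp only [List.nil_append, List.map_map]
        congr 1
        · apply List.map_congr_left
          intro k hk
          simp only [List.mem_range] at hk
          rw [PySem.List.pyGetD_map_pyRange_of_nonneg _ _ _ _ (by positivity) (by omega)]
          simp [Function.comp]
        · apply List.map_congr_left
          intro k hk
          simp only [List.mem_range] at hk
          rw [PySem.List.pyGetD_map_pyRange_of_nonneg _ _ _ _ (by positivity) (by omega)]
          simp [Function.comp]

-- ===== VERDICT (by name: the statement is the Claim_ definition above) =====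
theorem grid_pos_spec : Claim_equal_grid_pos := by
  intro row col _
  unfold Spec_grid_pos
  exact grid_pos_main row col
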